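-- pv_equiv track=rewrite | github.com/hcoxec/h | code/model.py | idx_ngrams
-- ===== SOURCE A (Python) =====
-- from itertools import tee
--
-- def n_gram(sequence, n):
--     iterables = tee(sequence, n)
--
--     for i, sub_iterable in enumerate(iterables):  # For each window,
--         for _ in range(i):  # iterate through every order of ngrams
--             next(sub_iterable, None)  # generate the ngrams within the window.
--
--     return list(zip(*iterables))  # Unpack and flattens the iterables.
--
-- def idx_ngrams(max_len, n):
--     idxs = n_gram(range(max_len), n=n)
--     overlap_matrix = []
--     for i in range(max_len):
--         ii = []
--         for inn, ngr in enumerate(idxs):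
--             if i in ngr:
--                 ii.append(inn)
--         overlap_matrix.append(ii)
--
--     return overlap_matrix
-- ===== SOURCE B (Python) =====
-- def idx_ngrams(max_len, n):
--     # The j-th n-gram of range(max_len) is (j, ..., j+n-1), so the ngrams
--     # containing index i are exactly the contiguous block of ngram indices
--     # max(0, i-n+1) .. min(i, max_len-n): emit that range directly.
--     last = max_len - n
--     return [list(range(max(0, i - n + 1), min(i, last) + 1))
--             for i in range(max_len)]
-- ===== Notes on version B (the rewrite author's own statement) =====
-- stated objective: faster
-- what changed: A materialises all ngrams of range(max_len) and, for each index i, scans every ngram testing membership; B emits for each i the contiguous block of ngram indices max(0,i-n+1)..min(i,max_len-n) directly as a range, with no ngram list and no membership tests.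
import Mathlib
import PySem

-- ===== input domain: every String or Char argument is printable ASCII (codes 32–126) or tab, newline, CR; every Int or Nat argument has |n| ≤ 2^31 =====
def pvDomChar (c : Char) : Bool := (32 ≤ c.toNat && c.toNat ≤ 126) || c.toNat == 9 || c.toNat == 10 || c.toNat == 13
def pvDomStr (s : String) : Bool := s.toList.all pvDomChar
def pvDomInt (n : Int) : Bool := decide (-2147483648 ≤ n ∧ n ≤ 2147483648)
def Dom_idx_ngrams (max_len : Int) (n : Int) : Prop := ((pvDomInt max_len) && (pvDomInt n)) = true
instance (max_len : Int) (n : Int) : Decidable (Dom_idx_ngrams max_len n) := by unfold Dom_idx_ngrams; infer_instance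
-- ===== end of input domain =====

-- B replaces A's scan of all ngrams per index by emitting the contiguous ngram-index
-- range max(0,i-n+1)..min(i,max_len-n) directly: asymptotically faster.

-- ===== PORT A =====
-- list(zip(*ls)) for materialised iterables, ported by hand (exact: zip of zero
-- iterables is [], otherwise take one head of each until some iterable is exhausted).
def pyZipN (ls : List (List Int)) : List (List Int) :=
  if h : ls ≠ [] ∧ ∀ l ∈ ls, l ≠ [] then  -- h used by decreasing_by
    (ls.map (fun l => l.headD 0)) :: pyZipN (ls.map (fun l => l.tail))
  else []
termination_by (ls.headD []).length
decreasing_by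
  obtain ⟨hne, hall⟩ := h
  cases ls with
  | nil => exact absurd rfl hne
  | cons x t =>
    have hx : x ≠ [] := hall x (List.mem_cons_self)
    cases x with
    | nil => exact absurd rfl hx
    | cons y ys => simp

-- tee(sequence, n) gives n copies; copy i is advanced i times (= drop i); zip(*…) = pyZipN
def n_gram (sequence : List Int) (n : Int) : List (List Int) :=
  pyZipN ((PySem.List.pyRange 0 n 1).map (fun i => sequence.drop i.toNat))

def idx_ngrams (max_len : Int) (n : Int) : List (List Int) :=
  let idxs := n_gram (PySem.List.pyRange 0 max_len 1) n
  (PySem.List.pyRange 0 max_len 1).foldl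
    (fun overlap_matrix i =>
      overlap_matrix ++
        [(PySem.List.enumerate idxs 0).foldl
          (fun ii p => if i ∈ p.2 then ii ++ [p.1] else ii) []]) []

-- ===== PORT B =====
def idx_ngrams_alt (max_len : Int) (n : Int) : List (List Int) :=
  let last := max_len - n
  (PySem.List.pyRange 0 max_len 1).map (fun i =>
    PySem.List.pyRange (max 0 (i - n + 1)) (min i last + 1) 1)

-- ===== PRECONDITION & SPEC =====
-- A raises ValueError (from tee) when n < 0; that is all Pre_ excludes.
def Pre_idx_ngrams (max_len : Int) (n : Int) : Prop := 0 ≤ n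
instance (max_len : Int) (n : Int) : Decidable (Pre_idx_ngrams max_len n) := by unfold Pre_idx_ngrams; infer_instance
def pvWitness_idx_ngrams : Int × Int := (5, 2)

def Spec_idx_ngrams (max_len : Int) (n : Int) (out : List (List Int)) : Prop := out = idx_ngrams_alt max_len n
instance (max_len : Int) (n : Int) (out : List (List Int)) : Decidable (Spec_idx_ngrams max_len n out) := by unfold Spec_idx_ngrams; infer_instance

-- ===== CLAIM (what is proved, stated in full; the proofs are below) =====
def Claim_equal_idx_ngrams : Prop := ∀ (max_len : Int) (n : Int), Dom_idx_ngrams max_len n → Pre_idx_ngrams max_len n → Spec_idx_ngrams max_len n (idx_ngrams max_len n)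

-- ===== LEMMAS AND PROOFS =====

theorem pyZipN_nil : pyZipN [] = [] := by
  rw [pyZipN]; simp

-- dropping k elements of a contiguous range shifts its start
theorem drop_pyRange (m : Int) : ∀ (k : Nat) (c : Int),
    (PySem.List.pyRange c m 1).drop k = PySem.List.pyRange (c + k) m 1 := by
  intro k
  induction k with
  | zero => intro c; simp
  | succ k ih =>
    intro c
    by_cases h : c < m
    · rw [PySem.List.pyRange_one_cons h]
      have := ih (c + 1)
      simpa [add_assoc, add_comm, add_left_comm] using this
    · rw [PySem.List.pyRange_one_eq_nil (by omega), PySem.List.pyRange_one_eq_nil (by omega)]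
      simp

-- zipping the n shifted copies of a range produces the list of n-windows
theorem pyZipN_windows (n : Int) (hn : 1 ≤ n) (b : Int) : ∀ (k : Nat) (a : Int), (b - a).toNat = k →
    pyZipN ((PySem.List.pyRange 0 n 1).map (fun i => PySem.List.pyRange (a + i) b 1)) =
      (PySem.List.pyRange a (b - n + 1) 1).map (fun j => PySem.List.pyRange j (j + n) 1) := by
  intro k
  induction k with
  | zero =>
    intro a ha
    rw [pyZipN]
    rw [dif_neg]
    · rw [PySem.List.pyRange_one_eq_nil (by omega)]
      simp
    · rintro ⟨-, hall⟩
      have hmem : PySem.List.pyRange (a + (n - 1)) b 1 ∈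
          (PySem.List.pyRange 0 n 1).map (fun i => PySem.List.pyRange (a + i) b 1) :=
        List.mem_map_of_mem (by rw [PySem.List.mem_pyRange_one]; omega)
      exact hall _ hmem (PySem.List.pyRange_one_eq_nil (by omega))
  | succ k ih =>
    intro a ha
    by_cases hab : a + n ≤ b
    · -- every shifted copy is nonempty: peel one head off each
      rw [pyZipN, dif_pos]
      · have hheads : ((PySem.List.pyRange 0 n 1).map (fun i => PySem.List.pyRange (a + i) b 1)).map
            (fun l => l.headD 0) = PySem.List.pyRange a (a + n) 1 := by
          rw [List.map_map]
          rw [PySem.List.pyRange_one 0 n, PySem.List.pyRange_one a (a + n)]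
          simp only [List.map_map]
          have hlen : a + n - a = n - 0 := by ring
          rw [hlen]
          refine List.map_congr_left ?_
          intro x hx
          rw [List.mem_range] at hx
          have hxn : (x : Int) < n := by omega
          simp only [Function.comp]
          rw [PySem.List.pyRange_one_cons (by omega)]
          simp [add_comm]
        have htails : ((PySem.List.pyRange 0 n 1).map (fun i => PySem.List.pyRange (a + i) b 1)).map
            (fun l => l.tail) = (PySem.List.pyRange 0 n 1).map (fun i => PySem.List.pyRange (a + 1 + i) b 1) := by
          rw [List.map_map]
          refine List.map_congr_left ?_
          intro i hi
          rw [PySem.List.mem_pyRange_one] at hi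
          simp only [Function.comp]
          rw [PySem.List.pyRange_one_cons (by omega)]
          simp only [List.tail_cons]
          congr 1
          omega
        rw [hheads, htails, ih (a + 1) (by omega)]
        rw [PySem.List.pyRange_one_cons (show a < b - n + 1 by omega)]
        simp
      · constructor
        · have : (0 : Int) ∈ PySem.List.pyRange 0 n 1 := by
            rw [PySem.List.mem_pyRange_one]; omega
          exact List.ne_nil_of_mem (List.mem_map_of_mem this)
        · intro l hl
          rw [List.mem_map] at hl
          obtain ⟨i, hi, rfl⟩ := hl
          rw [PySem.List.mem_pyRange_one] at hi
          rw [PySem.List.pyRange_one_cons (by omega)]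
          simp
    · -- too short: the last copy is empty, so zip stops immediately
      rw [pyZipN, dif_neg]
      · rw [PySem.List.pyRange_one_eq_nil (by omega)]
        simp
      · rintro ⟨-, hall⟩
        have hmem : PySem.List.pyRange (a + (n - 1)) b 1 ∈
            (PySem.List.pyRange 0 n 1).map (fun i => PySem.List.pyRange (a + i) b 1) :=
          List.mem_map_of_mem (by rw [PySem.List.mem_pyRange_one]; omega)
        exact hall _ hmem (PySem.List.pyRange_one_eq_nil (by omega))

-- enumerating a comprehension over a range whose counter starts at the range's start
theorem enumerate_map_pyRange (g : Int → List Int) : ∀ (k : Nat) (a K : Int), (K - a).toNat = k →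
    PySem.List.enumerate ((PySem.List.pyRange a K 1).map g) a =
      (PySem.List.pyRange a K 1).map (fun j => (j, g j)) := by
  intro k
  induction k with
  | zero =>
    intro a K h
    rw [PySem.List.pyRange_one_eq_nil (by omega)]
    simp [PySem.List.enumerate_nil]
  | succ k ih =>
    intro a K h
    by_cases hK : a < K
    · rw [PySem.List.pyRange_one_cons hK]
      simp only [List.map_cons, PySem.List.enumerate_cons]
      rw [ih (a + 1) K (by omega)]
    · rw [PySem.List.pyRange_one_eq_nil (by omega)]
      simp [PySem.List.enumerate_nil]

-- the inner scan of all windows collects the contiguous block of window indices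
theorem inner_scan (i n : Int) : ∀ (k : Nat) (K : Int), K.toNat = k →
    (PySem.List.pyRange 0 K 1).foldl
      (fun ii j => if i ∈ PySem.List.pyRange j (j + n) 1 then ii ++ [j] else ii) [] =
      PySem.List.pyRange (max 0 (i - n + 1)) (min i (K - 1) + 1) 1 := by
  intro k
  induction k with
  | zero =>
    intro K h
    rw [PySem.List.pyRange_one_eq_nil (by omega), PySem.List.pyRange_one_eq_nil (by omega)]
    simp
  | succ k ih =>
    intro K h
    have h0 : (0 : Int) ≤ K - 1 := by omega
    rw [show K = (K - 1) + 1 by ring, PySem.List.pyRange_one_succ_right h0,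
      List.foldl_append, ih (K - 1) (by omega)]
    simp only [List.foldl_cons, List.foldl_nil]
    by_cases hmem : i ∈ PySem.List.pyRange (K - 1) (K - 1 + n) 1
    · rw [if_pos hmem]
      rw [PySem.List.mem_pyRange_one] at hmem
      have h1 : min i (K - 1 - 1) + 1 = K - 1 := by omega
      have h2 : min i (K - 1 + 1 - 1) + 1 = K - 1 + 1 := by omega
      rw [h1, h2, PySem.List.pyRange_one_succ_right (by omega)]
    · rw [if_neg hmem]
      rw [PySem.List.mem_pyRange_one] at hmem
      by_cases hi : i < K - 1
      · congr 1
        omega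
      · -- i ≥ K - 1 + n here: both ranges are empty
        rw [PySem.List.pyRange_one_eq_nil (by omega), PySem.List.pyRange_one_eq_nil (by omega)]

-- ===== VERDICT (by name: the statement is the Claim_ definition above) =====
theorem idx_ngrams_spec : Claim_equal_idx_ngrams := by
  intro m n _ hn
  unfold Pre_idx_ngrams at hn
  unfold Spec_idx_ngrams idx_ngrams idx_ngrams_alt n_gram
  simp only []
  rw [PySem.List.foldl_append_singleton_eq_map]
  simp only [List.nil_append]
  by_cases hn1 : 1 ≤ n
  · -- n ≥ 1: the zipped iterables are the windows
    have hdrop : (PySem.List.pyRange 0 n 1).map (fun i => (PySem.List.pyRange 0 m 1).drop i.toNat) =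
        (PySem.List.pyRange 0 n 1).map (fun i => PySem.List.pyRange (0 + i) m 1) := by
      refine List.map_congr_left ?_
      intro i hi
      rw [PySem.List.mem_pyRange_one] at hi
      rw [drop_pyRange m i.toNat 0]
      have : ((i.toNat : Int)) = i := Int.toNat_of_nonneg hi.1
      rw [this]
    rw [hdrop, pyZipN_windows n hn1 m (m - 0).toNat 0 rfl]
    rw [enumerate_map_pyRange _ (m - n + 1 - 0).toNat 0 (m - n + 1) rfl]
    refine List.map_congr_left ?_
    intro i hi
    rw [PySem.List.mem_pyRange_one] at hi
    rw [List.foldl_map]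
    rw [inner_scan i n (m - n + 1).toNat (m - n + 1) rfl]
    have : m - n + 1 - 1 = m - n := by ring
    rw [this]
  · -- n = 0: there are no ngrams at all and both sides give empty rows
    have hn0 : n = 0 := by omega
    subst hn0
    rw [PySem.List.pyRange_one_eq_nil (le_refl 0)]
    simp only [List.map_nil, pyZipN_nil, PySem.List.enumerate_nil, List.foldl_nil]
    refine List.map_congr_left ?_
    intro i hi
    rw [PySem.List.mem_pyRange_one] at hi
    rw [PySem.List.pyRange_one_eq_nil (by omega)]
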